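-- pv_equiv track=rewrite | github.com/Nidhi-Vraj/EAI-Projects | part2/quintris.py | get_positions
-- ===== SOURCE A (Python) =====
-- def get_positions(board):
--     board_cols = zip(*board)
--     index_of_cols_list = []
--     col_num = 0
--     for col in board_cols:
--         col_as_list = list(col)
--         if 'x' in col_as_list:
--             x_index = col_as_list.index('x')
--             index_of_cols_list.append((col_num, x_index))
--
--         else:
--             index_of_cols_list.append((col_num, 25))
--         col_num += 1
--     return index_of_cols_list
-- ===== SOURCE B (Python) =====
-- def get_positions(board):
--     ncols = min((len(row) for row in board), default=0)
--     first = [None] * ncols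
--     for r, row in enumerate(board):
--         first = [r if v is None and row[c] == 'x' else v
--                  for c, v in enumerate(first)]
--     return [(c, 25 if v is None else v) for c, v in enumerate(first)]
-- ===== Notes on version B (the rewrite author's own statement) =====
-- stated objective: alternative
-- what changed: Replaces the zip-transpose with per-column 'in'+'.index' scans by a single row-major pass that maintains a first-occurrence array (None until found), filling in the 25 sentinel only at the end.
import Mathlib
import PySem

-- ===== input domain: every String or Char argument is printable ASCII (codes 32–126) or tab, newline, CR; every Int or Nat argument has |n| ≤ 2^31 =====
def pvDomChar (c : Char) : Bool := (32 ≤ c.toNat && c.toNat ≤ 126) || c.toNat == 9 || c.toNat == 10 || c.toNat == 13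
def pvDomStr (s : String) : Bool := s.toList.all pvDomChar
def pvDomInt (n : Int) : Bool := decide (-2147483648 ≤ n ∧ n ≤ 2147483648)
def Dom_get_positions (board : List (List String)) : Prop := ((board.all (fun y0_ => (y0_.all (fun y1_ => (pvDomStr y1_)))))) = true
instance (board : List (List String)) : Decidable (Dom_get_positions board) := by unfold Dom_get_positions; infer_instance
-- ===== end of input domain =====

-- B replaces A's zip-transpose + per-column 'in'/'.index' scans by one row-major pass
-- over the rows that maintains a first-occurrence array (objective: alternative).

-- termination helpers for pyZipStar (cited by its decreasing_by)
theorem pv_tails_sum_le (rows : List (List String)) :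
    ((rows.map List.tail).map List.length).sum ≤ (rows.map List.length).sum := by
  induction rows with
  | nil => simp
  | cons r rs ih =>
    simp only [List.map_cons, List.sum_cons, List.length_tail]
    omega

theorem pv_tails_sum_lt (rows : List (List String)) (hne : rows ≠ [])
    (h : ∀ r ∈ rows, ¬ r.isEmpty) :
    ((rows.map List.tail).map List.length).sum < (rows.map List.length).sum := by
  match rows with
  | [] => exact absurd rfl hne
  | r :: rs =>
    have h1 : 1 ≤ r.length := by
      have := h r (by simp)
      cases r <;> simp_all
    have h2 := pv_tails_sum_le rs
    simp only [List.map_cons, List.sum_cons, List.length_tail]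
    omega

-- ===== PORT A =====
-- zip(*board): list of columns, truncated at the shortest row; [] when there are no rows
def pyZipStar (rows : List (List String)) : List (List String) :=
  if _hguard : rows = [] ∨ rows.any List.isEmpty then []
  else (rows.map (fun r => r.headD "")) :: pyZipStar (rows.map List.tail)
termination_by (rows.map List.length).sum
decreasing_by
  rcases not_or.mp _hguard with ⟨h1, h2⟩
  have hlt := pv_tails_sum_lt rows h1 (by
    intro r hr habs
    exact h2 (List.any_eq_true.mpr ⟨r, hr, habs⟩))
  simpa using hlt

-- loop body of A: append (col_num, x-index or 25), bump col_num
-- col.index('x') is guarded by the 'x' ∈ col test, so the .getD 0 default is never used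
def stepA (acc : List (Int × Int) × Int) (col : List String) : List (Int × Int) × Int :=
  if "x" ∈ col then
    (acc.1 ++ [(acc.2, (((PySem.List.index? col "x").getD 0 : Nat) : Int))], acc.2 + 1)
  else
    (acc.1 ++ [(acc.2, (25 : Int))], acc.2 + 1)

def get_positions (board : List (List String)) : List (Int × Int) :=
  ((pyZipStar board).foldl stepA ([], 0)).1

-- ===== PORT B =====
-- one row (index rr.1, cells rr.2): rebuild 'first', filling still-None columns that hold 'x'
-- the read index cv.1 comes from enumerate, hence 0 ≤ cv.1 < ncols ≤ len(row): pyGet? is always some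
def stepB (first : List (Option Int)) (rr : Int × List String) : List (Option Int) :=
  (PySem.List.enumerate first).map (fun cv =>
    if cv.2 = none ∧ (PySem.List.pyGet? rr.2 cv.1).getD "" = "x" then some rr.1 else cv.2)

def get_positions_alt (board : List (List String)) : List (Int × Int) :=
  let ncols : Nat := ((board.map List.length).min?).getD 0
  let first : List (Option Int) :=
    (PySem.List.enumerate board).foldl stepB (List.replicate ncols none)
  (PySem.List.enumerate first).map (fun cv => (cv.1, cv.2.getD 25))

-- ===== PRECONDITION & SPEC =====
def Spec_get_positions (board : List (List String)) (out : List (Int × Int)) : Prop := out = get_positions_alt board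
instance (board : List (List String)) (out : List (Int × Int)) : Decidable (Spec_get_positions board out) := by unfold Spec_get_positions; infer_instance

-- ===== CLAIM (what is proved, stated in full; the proofs are below) =====
def Claim_equal_get_positions : Prop := ∀ (board : List (List String)), Dom_get_positions board → Spec_get_positions board (get_positions board)

-- ===== LEMMAS AND PROOFS =====

-- column c of the board (shared spec vocabulary for both sides)
def colAt (board : List (List String)) (c : Nat) : List String :=
  board.map (fun row => row.getD c "")

def valOf (col : List String) : Int :=
  if "x" ∈ col then (((PySem.List.index? col "x").getD 0 : Nat) : Int) else 25

def ncolsOf (board : List (List String)) : Nat :=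
  ((board.map List.length).min?).getD 0

theorem min?_map_pred (l : List Nat) :
    (l.map (fun n => n - 1)).min? = l.min?.map (fun n => n - 1) := by
  induction l with
  | nil => simp
  | cons a l ih =>
    simp only [List.map_cons, List.min?_cons, ih]
    cases h : l.min? with
    | none => simp
    | some b => simp [Option.elim]; omega

theorem ncols_tail (board : List (List String)) :
    ncolsOf (board.map List.tail) = ncolsOf board - 1 := by
  unfold ncolsOf
  have h1 : (board.map List.tail).map List.length = (board.map List.length).map (fun n => n - 1) := by
    simp [Function.comp, List.length_tail]
  rw [h1, min?_map_pred]
  cases (board.map List.length).min? <;> simp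

theorem ncols_zero_of_empty_mem (board : List (List String)) (r : List String)
    (hr : r ∈ board) (he : r.isEmpty) : ncolsOf board = 0 := by
  unfold ncolsOf
  cases h : (board.map List.length).min? with
  | none => simp
  | some a =>
    have := (List.min?_eq_some_iff.mp h).2 0 (by
      refine List.mem_map.mpr ⟨r, hr, ?_⟩
      simpa [List.isEmpty_iff] using he)
    simpa using this

theorem ncols_pos (board : List (List String)) (hne : board ≠ [])
    (h : ∀ r ∈ board, ¬ r.isEmpty) : 1 ≤ ncolsOf board := by
  unfold ncolsOf
  cases hm : (board.map List.length).min? with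
  | none =>
    rw [List.min?_eq_none_iff] at hm
    exact absurd (List.map_eq_nil_iff.mp hm) hne
  | some a =>
    obtain ⟨ha, -⟩ := List.min?_eq_some_iff.mp hm
    obtain ⟨r, hr, rfl⟩ := List.mem_map.mp ha
    have := h r hr
    simp only [Option.getD_some]
    cases r <;> simp_all

theorem colAt_tail (board : List (List String)) (c : Nat) :
    colAt (board.map List.tail) c = colAt board (c + 1) := by
  unfold colAt
  rw [List.map_map]
  refine List.map_congr_left (fun row _ => ?_)
  cases row <;> simp

theorem zipStar_eq (n : Nat) : ∀ (board : List (List String)), ncolsOf board = n →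
    pyZipStar board = (List.range n).map (colAt board) := by
  induction n with
  | zero =>
    intro board hn
    rw [pyZipStar]
    simp only [List.range_zero, List.map_nil]
    split
    · rfl
    · rename_i h
      rcases not_or.mp h with ⟨h1, h2⟩
      have hpos := ncols_pos board h1 (by
        intro r hr habs
        exact h2 (List.any_eq_true.mpr ⟨r, hr, habs⟩))
      omega
  | succ n ih =>
    intro board hn
    have hne : board ≠ [] := by
      rintro rfl
      simp [ncolsOf] at hn
    have hno : ∀ r ∈ board, ¬ r.isEmpty := by
      intro r hr habs
      have := ncols_zero_of_empty_mem board r hr habs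
      omega
    rw [pyZipStar]
    rw [dif_neg (by
      rw [not_or]
      exact ⟨hne, by
        intro hany
        obtain ⟨r, hr, habs⟩ := List.any_eq_true.mp hany
        exact hno r hr habs⟩)]
    have htail : ncolsOf (board.map List.tail) = n := by
      rw [ncols_tail, hn]; omega
    rw [ih (board.map List.tail) htail]
    rw [List.range_succ_eq_map, List.map_cons, List.map_map]
    congr 1
    · unfold colAt
      refine List.map_congr_left (fun row _ => ?_)
      cases row <;> simp
    · refine List.map_congr_left (fun c _ => ?_)
      simp only [Function.comp]
      exact colAt_tail board c

theorem A_fold (cols : List (List String)) : ∀ (acc : List (Int × Int)) (k : Int),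
    (cols.foldl stepA (acc, k)).1
      = acc ++ (PySem.List.enumerate cols k).map (fun p => (p.1, valOf p.2)) := by
  induction cols with
  | nil => intro acc k; simp [PySem.List.enumerate_nil]
  | cons col cols ih =>
    intro acc k
    rw [PySem.List.enumerate_cons]
    simp only [List.foldl_cons, stepA]
    split
    next h => rw [ih]; simp only [List.append_assoc, List.singleton_append]; simp [valOf, h]
    next h => rw [ih]; simp only [List.append_assoc, List.singleton_append]; simp [valOf, h]

theorem B_loop (rows : List (List String)) : ∀ (s : Int) (first : List (Option Int)),
    (PySem.List.enumerate rows s).foldl stepB first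
      = (List.range first.length).map (fun c =>
          (first.getD c none).or
            ((PySem.List.index? (colAt rows c) "x").map (fun k => (k : Int) + s))) := by
  induction rows with
  | nil =>
    intro s first
    simp only [PySem.List.enumerate_nil, List.foldl_nil, colAt, List.map_nil]
    rw [show (PySem.List.index? ([] : List String) "x") = none from
      (PySem.List.index?_eq_none_iff _ _).mpr (by simp)]
    apply List.ext_getElem
    · simp
    · intro i h1 h2
      simp [List.getD_eq_getElem?_getD, List.getElem?_eq_getElem h1]
  | cons row rows ih =>
    intro s first
    rw [PySem.List.enumerate_cons, List.foldl_cons, ih]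
    have hlen : (stepB first (s, row)).length = first.length := by
      simp [stepB, PySem.List.length_enumerate]
    rw [hlen]
    refine List.map_congr_left (fun c hc => ?_)
    have hc' : c < first.length := List.mem_range.mp hc
    -- the updated cell at column c
    have hcell : (stepB first (s, row)).getD c none
        = (if first[c] = none ∧ row[c]?.getD "" = "x" then some s else first[c]) := by
      have h1 : (stepB first (s, row)).getD c none = (stepB first (s, row))[c]'(by omega) := by
        rw [List.getD_eq_getElem?_getD, List.getElem?_eq_getElem (by omega)]
        simp
      rw [h1]
      simp only [stepB, List.getElem_map, PySem.List.getElem_enumerate]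
      have h2 : PySem.List.pyGet? row ((0 : Int) + (c : Nat)) = row[c]? := by
        rw [show ((0 : Int) + (c : Nat)) = ((c : Nat) : Int) by omega]
        exact PySem.List.pyGet?_natCast row c
      rw [h2]
    have hcol : colAt (row :: rows) c = row[c]?.getD "" :: colAt rows c := by
      simp [colAt, List.getD_eq_getElem?_getD]
    rw [hcell, hcol]
    cases hfc : first[c] with
    | some v =>
      simp [List.getElem?_eq_getElem hc', hfc]
    | none =>
      have hget : first.getD c none = none := by
        rw [List.getD_eq_getElem?_getD, List.getElem?_eq_getElem hc']; simp [hfc]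
      rw [hget]
      by_cases hx : row[c]?.getD "" = "x"
      · rw [if_pos ⟨rfl, hx⟩]
        rw [hx, PySem.List.index?_cons_self]
        simp
      · rw [if_neg (by simp [hx])]
        rw [PySem.List.index?_cons_of_ne _ hx]
        simp only [Option.none_or]
        cases PySem.List.index? (colAt rows c) "x" with
        | none => simp
        | some k => simp; omega

-- ===== VERDICT (by name: the statement is the Claim_ definition above) =====
theorem get_positions_spec : Claim_equal_get_positions := by
  intro board _
  unfold Spec_get_positions
  have hA : get_positions board
      = (PySem.List.enumerate ((List.range (ncolsOf board)).map (colAt board)) 0).map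
          (fun p => (p.1, valOf p.2)) := by
    unfold get_positions
    rw [zipStar_eq (ncolsOf board) board rfl, A_fold]
    simp
  have hB : get_positions_alt board
      = (PySem.List.enumerate ((PySem.List.enumerate board 0).foldl stepB
          (List.replicate (ncolsOf board) none)) 0).map (fun cv => (cv.1, cv.2.getD 25)) := rfl
  have hval : ∀ col : List String,
      ((PySem.List.index? col "x").map (fun k => (k : Int) + 0)).getD 25 = valOf col := by
    intro col
    unfold valOf
    by_cases hmem : "x" ∈ col
    · obtain ⟨k, hk⟩ := Option.isSome_iff_exists.mp ((PySem.List.index?_isSome_iff _ _).mpr hmem)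
      rw [PySem.List.index?_eq_idxOf?] at hk
      simp [hmem, hk]
    · rw [(PySem.List.index?_eq_none_iff _ _).mpr hmem]
      simp [hmem]
  rw [hA, hB, B_loop]
  apply List.ext_getElem
  · simp [PySem.List.length_enumerate]
  · intro i h1 h2
    have hi : i < ncolsOf board := by
      simpa [PySem.List.length_enumerate] using h1
    have hrep : (List.replicate (ncolsOf board) (none : Option Int)).getD i none = none := by
      simp [List.getD_eq_getElem?_getD, List.getElem?_replicate]
      split <;> rfl
    simp only [List.getElem_map, PySem.List.getElem_enumerate, List.getElem_range,
      List.length_replicate]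
    rw [hrep]
    simp only [Option.none_or]
    rw [hval]
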